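-- pv_equiv track=rewrite | github.com/Clara-Ye/15-112 | hw5.py | areLegalValues
-- ===== SOURCE A (Python) =====
-- def areLegalValues(values):
--     legalValues = [n for n in range(len(values)+1)]
--     for value in values:
--         if value not in legalValues:
--             return False
--         elif (values.count(value) > 1) and (value != 0):
--             return False
--     return True
-- ===== SOURCE B (Python) =====
-- def areLegalValues(values):
--     n = len(values)
--     if any(not (0 <= v <= n) for v in values):
--         return False
--     nonzero = [v for v in values if v != 0]
--     return len(nonzero) == len(set(nonzero))
-- ===== Notes on version B (the rewrite author's own statement) =====
-- stated objective: simpler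
-- what changed: Replaces A's single early-returning loop that re-scans the whole list with values.count for every element (quadratic) by two separate passes: a range check, then a set built once whose size detects duplicates among the nonzero values.
import Mathlib
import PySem

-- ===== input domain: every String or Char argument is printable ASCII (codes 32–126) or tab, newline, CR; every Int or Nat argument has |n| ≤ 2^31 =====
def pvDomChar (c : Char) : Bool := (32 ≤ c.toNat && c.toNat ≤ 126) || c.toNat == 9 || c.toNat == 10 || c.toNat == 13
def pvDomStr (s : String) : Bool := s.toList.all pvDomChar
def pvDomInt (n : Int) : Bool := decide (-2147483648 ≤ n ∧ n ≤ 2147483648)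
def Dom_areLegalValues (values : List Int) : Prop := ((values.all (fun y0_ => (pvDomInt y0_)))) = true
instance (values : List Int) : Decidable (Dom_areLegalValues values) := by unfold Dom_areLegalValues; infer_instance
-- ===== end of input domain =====

-- B replaces A's early-returning loop (which re-counts the whole list per element) by a
-- range pass plus a set-size duplicate check on the nonzero values; return value unchanged.

-- ===== PORT A =====
-- the for-loop of A: walks the remaining values, keeping the whole list for `values.count`
def areLegalLoop (values legal : List Int) : List Int → Bool
  | [] => true
  | v :: rest =>
    if ¬ (legal.contains v) then false
    else if PySem.List.count values v > 1 ∧ v ≠ 0 then false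
    else areLegalLoop values legal rest

def areLegalValues (values : List Int) : Bool :=
  let legalValues := PySem.List.pyRange 0 ((values.length : Int) + 1) 1
  areLegalLoop values legalValues values

-- ===== PORT B =====
def areLegalValues_alt (values : List Int) : Bool :=
  let n : Int := values.length
  if values.any (fun v => ¬ (0 ≤ v ∧ v ≤ n)) then false
  else
    let nonzero := values.filter (fun v => v ≠ 0)
    nonzero.length == (PySem.Set.ofList nonzero).length

-- ===== PRECONDITION & SPEC =====
def Spec_areLegalValues (values : List Int) (out : Bool) : Prop := out = areLegalValues_alt values
instance (values : List Int) (out : Bool) : Decidable (Spec_areLegalValues values out) := by unfold Spec_areLegalValues; infer_instance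

-- ===== CLAIM (what is proved, stated in full; the proofs are below) =====
def Claim_equal_areLegalValues : Prop := ∀ (values : List Int), Dom_areLegalValues values → Spec_areLegalValues values (areLegalValues values)

-- ===== LEMMAS AND PROOFS =====

-- A's loop is an `all` over the remaining values
theorem areLegalLoop_eq_all (values legal : List Int) : ∀ rest : List Int,
    areLegalLoop values legal rest =
      rest.all (fun v => decide (v ∈ legal) &&
        (!(decide (1 < List.count v values)) || decide (v = 0)))
  | [] => rfl
  | v :: rest => by
    simp only [areLegalLoop, List.all_cons, areLegalLoop_eq_all values legal rest,
      PySem.List.count_eq, List.contains_eq_mem, gt_iff_lt]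
    by_cases h1 : v ∈ legal
    · by_cases h2 : 1 < List.count v values ∧ v ≠ 0
      · simp [h1, h2]
      · rw [not_and_or] at h2
        rcases h2 with h2 | h2
        · simp [h1, h2]
        · have hz := not_not.mp h2
          simp [hz]
    · simp [h1]

-- Set.ofList builds a sublist of its input
theorem foldl_add_sublist {α : Type} [BEq α] : ∀ (xs s : List α),
    (List.foldl PySem.Set.add s xs).Sublist (s ++ xs)
  | [], s => by simp
  | x :: xs, s => by
    have h := foldl_add_sublist xs (PySem.Set.add s x)
    refine List.Sublist.trans (by simpa using h) ?_
    unfold PySem.Set.add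
    split
    · exact List.Sublist.append_left (List.sublist_cons_self x xs) s
    · simp [List.append_assoc]

theorem ofList_sublist {α : Type} [BEq α] (xs : List α) :
    (PySem.Set.ofList xs).Sublist xs := by
  simpa using foldl_add_sublist xs []

-- set-size duplicate test = Nodup
theorem length_ofList_eq_iff {α : Type} [BEq α] [LawfulBEq α] (xs : List α) :
    (xs.length = (PySem.Set.ofList xs).length) ↔ xs.Nodup := by
  constructor
  · intro h
    have := (ofList_sublist xs).eq_of_length h.symm
    rw [← this]; exact PySem.Set.nodup_ofList xs
  · intro h; rw [PySem.Set.ofList_eq_self_of_nodup xs h]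

theorem main_eq (values : List Int) :
    areLegalValues values = areLegalValues_alt values := by
  unfold areLegalValues areLegalValues_alt
  simp only [areLegalLoop_eq_all]
  by_cases hr : ∀ v ∈ values, 0 ≤ v ∧ v ≤ (values.length : Int)
  · -- every value is in range: the any-test is false, and contains = true for each element
    have hany : values.any (fun v => ¬ (0 ≤ v ∧ v ≤ (values.length : Int))) = false := by
      simp only [List.any_eq_false]
      intro v hv; simpa using hr v hv
    rw [hany]
    simp only [Bool.false_eq_true, if_false]
    apply Bool.coe_iff_coe.mp
    simp only [List.all_eq_true, Bool.and_eq_true, Bool.or_eq_true, Bool.not_eq_eq_eq_not,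
      Bool.not_true, decide_eq_false_iff_not, decide_eq_true_eq, not_lt, beq_iff_eq]
    rw [length_ofList_eq_iff, List.nodup_iff_count_le_one]
    constructor
    · intro h a
      by_cases ha : a = 0
      · subst ha
        rw [List.count_eq_zero.mpr (by simp)]; omega
      · rw [List.count_filter (by simpa using ha)]
        by_cases hm : a ∈ values
        · rcases (h a hm).2 with hc | hc
          · exact hc
          · exact absurd hc ha
        · rw [List.count_eq_zero.mpr hm]; omega
    · intro h v hv
      refine ⟨?_, ?_⟩
      · have := hr v hv
        simp [PySem.List.mem_pyRange_one]; omega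
      · by_cases hz : v = 0
        · exact Or.inr hz
        · refine Or.inl ?_
          have := h v
          rw [List.count_filter (by simpa using hz)] at this
          exact this
  · -- some value out of range: both sides are false
    rw [not_forall] at hr
    obtain ⟨v, hv'⟩ := hr
    rw [Classical.not_imp] at hv'
    obtain ⟨hv, hout⟩ := hv'
    have hany : values.any (fun v => ¬ (0 ≤ v ∧ v ≤ (values.length : Int))) = true := by
      simp only [List.any_eq_true]
      exact ⟨v, hv, by simp only [decide_eq_true_eq]; exact hout⟩
    rw [hany]
    simp only [if_true]
    rw [List.all_eq_false]
    refine ⟨v, hv, ?_⟩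
    simp only [PySem.List.mem_pyRange_one, Bool.and_eq_true, decide_eq_true_eq, not_and_or]
    left; omega

-- ===== VERDICT (by name: the statement is the Claim_ definition above) =====
theorem areLegalValues_spec : Claim_equal_areLegalValues := by
  intro values _
  exact main_eq values
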